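-- pv_equiv track=rewrite | github.com/pypi-data/pypi-mirror-345 | packages/codemap/codemap-0.2.0.tar.gz/codemap-0.2.0/src/codemap/git/diff_splitter/utils.py | determine_commit_type
-- ===== SOURCE A (Python) =====
-- def determine_commit_type(files: list[str]) -> str:
-- 	"""
-- 	Determine the appropriate commit type based on the files.
--
-- 	Args:
-- 	    files: List of file paths
--
-- 	Returns:
-- 	    Commit type string (e.g., "feat", "fix", "test", "docs", "chore")
--
-- 	"""
-- 	# Check for test files
-- 	if any(f.startswith("tests/") or "_test." in f or "test_" in f for f in files):
-- 		return "test"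
--
-- 	# Check for documentation files
-- 	if any(f.startswith("docs/") or f.endswith(".md") for f in files):
-- 		return "docs"
--
-- 	# Check for configuration files
-- 	if any(f.endswith((".json", ".yml", ".yaml", ".toml", ".ini", ".cfg")) for f in files):
-- 		return "chore"
--
-- 	# Default to "chore" for general updates
-- 	return "chore"
-- ===== SOURCE B (Python) =====
-- _TYPES = ("chore", "docs", "test")
--
-- def _rank(f):
--     # Classify a single file to a severity rank: test > docs > other.
--     if f.startswith("tests/") or "_test." in f or "test_" in f:
--         return 2
--     if f.startswith("docs/") or f.endswith(".md"):
--         return 1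
--     return 0
--
-- def determine_commit_type(files: list[str]) -> str:
--     # Map-reduce: classify each file independently to a rank, take the
--     # maximum rank, and look the commit type up in a table.
--     return _TYPES[max(map(_rank, files), default=0)]
-- ===== Notes on version B (the rewrite author's own statement) =====
-- stated objective: alternative
-- what changed: Replaced A's three sequential whole-list any() scans (one priority question per scan) with a map-reduce: each file is classified independently to a numeric rank (test=2, docs=1, other=0), the ranks are reduced with max, and the commit type is looked up in a table; A's config-extension scan disappears since both its branches yield 'chore'.
import Mathlib
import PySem

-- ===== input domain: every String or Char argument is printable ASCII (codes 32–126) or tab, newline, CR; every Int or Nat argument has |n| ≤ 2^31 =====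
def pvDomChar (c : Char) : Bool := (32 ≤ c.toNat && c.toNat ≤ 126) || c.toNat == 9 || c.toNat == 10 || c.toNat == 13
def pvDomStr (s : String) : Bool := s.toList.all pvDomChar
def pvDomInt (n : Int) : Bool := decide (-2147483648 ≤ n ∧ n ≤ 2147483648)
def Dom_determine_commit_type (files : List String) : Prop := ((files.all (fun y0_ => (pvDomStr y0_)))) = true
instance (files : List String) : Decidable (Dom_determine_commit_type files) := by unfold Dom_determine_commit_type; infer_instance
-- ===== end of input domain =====

-- B replaces A's three sequential any() scans by a map-reduce: per-file numeric rank, max reduction, table lookup (alternative decomposition; same return value).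

-- ===== PORT A =====
def determine_commit_type (files : List String) : String :=
  if files.any (fun f => PySem.Str.startswith f "tests/" || PySem.Str.isIn "_test." f || PySem.Str.isIn "test_" f) then
    "test"
  else if files.any (fun f => PySem.Str.startswith f "docs/" || PySem.Str.endswith f ".md") then
    "docs"
  else if files.any (fun f => PySem.Str.endswith f ".json" || PySem.Str.endswith f ".yml" || PySem.Str.endswith f ".yaml" || PySem.Str.endswith f ".toml" || PySem.Str.endswith f ".ini" || PySem.Str.endswith f ".cfg") then
    "chore"
  else
    "chore"

-- ===== PORT B =====
def pvTypes : List String := ["chore", "docs", "test"]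

def pvRank (f : String) : Nat :=
  if PySem.Str.startswith f "tests/" || PySem.Str.isIn "_test." f || PySem.Str.isIn "test_" f then 2
  else if PySem.Str.startswith f "docs/" || PySem.Str.endswith f ".md" then 1
  else 0

def determine_commit_type_alt (files : List String) : String :=
  -- max(map(_rank, files), default=0); the index is always < 3, so the tuple lookup never raises
  pvTypes.getD ((files.map pvRank).foldl max 0) "chore"

-- ===== PRECONDITION & SPEC =====
def Spec_determine_commit_type (files : List String) (out : String) : Prop := out = determine_commit_type_alt files
instance (files : List String) (out : String) : Decidable (Spec_determine_commit_type files out) := by unfold Spec_determine_commit_type; infer_instance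

-- ===== CLAIM (what is proved, stated in full; the proofs are below) =====
def Claim_equal_determine_commit_type : Prop := ∀ (files : List String), Dom_determine_commit_type files → Spec_determine_commit_type files (determine_commit_type files)

-- ===== LEMMAS AND PROOFS =====
theorem pvFoldMax (files : List String) (a : Nat) :
    (files.map pvRank).foldl max a
      = max a (if files.any (fun f => PySem.Str.startswith f "tests/" || PySem.Str.isIn "_test." f || PySem.Str.isIn "test_" f) then 2
        else if files.any (fun f => PySem.Str.startswith f "docs/" || PySem.Str.endswith f ".md") then 1
        else 0) := by
  induction files generalizing a with
  | nil => simp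
  | cons f fs ih =>
    simp only [List.map_cons, List.foldl_cons, List.any_cons, ih, pvRank]
    rcases Bool.eq_false_or_eq_true (fs.any fun f => PySem.Str.startswith f "tests/" || PySem.Str.isIn "_test." f || PySem.Str.isIn "test_" f) with h1 | h1 <;>
      rcases Bool.eq_false_or_eq_true (fs.any fun f => PySem.Str.startswith f "docs/" || PySem.Str.endswith f ".md") with h2 | h2 <;>
        simp only [h1, h2, Bool.or_false, Bool.or_true, if_true] <;>
          split_ifs <;> simp_all

-- ===== VERDICT (by name: the statement is the Claim_ definition above) =====
theorem determine_commit_type_spec : Claim_equal_determine_commit_type := by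
  intro files _
  unfold Spec_determine_commit_type determine_commit_type determine_commit_type_alt
  rw [pvFoldMax]
  split_ifs <;> simp [pvTypes]
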